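-- pv_equiv track=rewrite | github.com/yeolsim2hajo/Team_hard | wonkyoung/programmers/level 2/귤_고르기.py | solution
-- ===== SOURCE A (Python) =====
-- def solution(k, tangerine):
--     size_cnt = {}
--     answer = 0
--     for size in tangerine:
--         if size_cnt.get(size):
--             size_cnt[size] += 1
--         else:
--             size_cnt[size] = 1
--     values = sorted(size_cnt.values(), reverse=True)
--     cnt = 0
--     for value in values:
--         cnt += value
--         answer += 1
--         if cnt >= k:
--             return answer
--     return answer
-- ===== SOURCE B (Python) =====
-- def solution(k, tangerine):
--     freq = {}
--     for size in tangerine: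
--         freq[size] = freq.get(size, 0) + 1
--     n = len(tangerine)
--     bucket = {}
--     for c in freq.values():
--         bucket[c] = bucket.get(c, 0) + 1
--     cnt = 0
--     answer = 0
--     for c in range(n, 0, -1):
--         for _ in range(bucket.get(c, 0)):
--             cnt += c
--             answer += 1
--             if cnt >= k:
--                 return answer
--     return answer
-- ===== Notes on version B (the rewrite author's own statement) =====
-- stated objective: alternative
-- what changed: Replaces the comparison sort of the frequency list by a counting/bucket pass: frequencies (all between 1 and n) are tallied into a second counter and consumed by iterating possible frequencies from n down to 1, so no sort is performed.
import Mathlib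
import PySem

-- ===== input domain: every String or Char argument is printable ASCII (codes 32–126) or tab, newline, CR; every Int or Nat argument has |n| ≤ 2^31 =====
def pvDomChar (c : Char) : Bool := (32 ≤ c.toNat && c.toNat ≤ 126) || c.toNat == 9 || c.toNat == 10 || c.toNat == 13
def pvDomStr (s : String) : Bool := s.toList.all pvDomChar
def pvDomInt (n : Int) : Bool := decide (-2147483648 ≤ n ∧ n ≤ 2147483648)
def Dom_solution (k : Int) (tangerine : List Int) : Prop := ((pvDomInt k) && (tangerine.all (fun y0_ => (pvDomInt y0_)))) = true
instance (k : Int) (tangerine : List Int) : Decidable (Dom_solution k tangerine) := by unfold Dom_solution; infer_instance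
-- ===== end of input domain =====

-- B replaces A's comparison sort of the frequency list by a counting/bucket pass over possible
-- frequencies (1..n) iterated descending; objective: alternative (sort-free) algorithm.

-- ===== PORT A =====
-- the early-returning accumulation loop 'for value in values: cnt += value; answer += 1; if cnt >= k: return answer'
def loopA (k : Int) : Int → Int → List Int → Int
  | _, answer, [] => answer
  | cnt, answer, v :: vs =>
      let cnt := cnt + v
      let answer := answer + 1
      if cnt ≥ k then answer else loopA k cnt answer vs

def solution (k : Int) (tangerine : List Int) : Int :=
  -- 'if size_cnt.get(size):' is truthiness: None and 0 are falsy, i.e. getD size 0 ≠ 0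
  let size_cnt := tangerine.foldl
    (fun d size => if d.getD size 0 ≠ 0 then d.insert size (d.getD size 0 + 1) else d.insert size 1)
    (PySem.Dict.empty : PySem.Dict Int Int)
  let values := PySem.List.sorted size_cnt.values (fun x => x) true
  loopA k 0 0 values

-- ===== PORT B =====
-- inner loop 'for _ in range(m): cnt += c; answer += 1; if cnt >= k: return answer'
-- (.inr answer = early return; .inl state = fell through)
def innerB (k c : Int) : Nat → Int × Int → Sum (Int × Int) Int
  | 0, st => .inl st
  | m + 1, (cnt, answer) =>
      let cnt := cnt + c
      let answer := answer + 1
      if cnt ≥ k then .inr answer else innerB k c m (cnt, answer)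

def solution_alt (k : Int) (tangerine : List Int) : Int :=
  let freq := tangerine.foldl
    (fun d size => d.insert size (d.getD size 0 + 1))
    (PySem.Dict.empty : PySem.Dict Int Int)
  let n : Int := tangerine.length
  let bucket := freq.values.foldl
    (fun d c => d.insert c (d.getD c 0 + 1))
    (PySem.Dict.empty : PySem.Dict Int Int)
  let r := (PySem.List.pyRange n 0 (-1)).foldl
    (fun (s : Sum (Int × Int) Int) c =>
      match s with
      | .inr a => .inr a
      | .inl st => innerB k c (bucket.getD c 0).toNat st)
    (Sum.inl (0, 0))
  match r with
  | .inl (_, answer) => answer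
  | .inr answer => answer

-- ===== PRECONDITION & SPEC =====
def Spec_solution (k : Int) (tangerine : List Int) (out : Int) : Prop := out = solution_alt k tangerine
instance (k : Int) (tangerine : List Int) (out : Int) : Decidable (Spec_solution k tangerine out) := by unfold Spec_solution; infer_instance

-- ===== CLAIM (what is proved, stated in full; the proofs are below) =====
def Claim_equal_solution : Prop := ∀ (k : Int) (tangerine : List Int), Dom_solution k tangerine → Spec_solution k tangerine (solution k tangerine)

-- ===== LEMMAS AND PROOFS =====

-- single step of the shared accumulation loop, on the sum-state
def stepB (k : Int) (s : Sum (Int × Int) Int) (v : Int) : Sum (Int × Int) Int :=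
  match s with
  | .inr a => .inr a
  | .inl (cnt, answer) => if cnt + v ≥ k then .inr (answer + 1) else .inl (cnt + v, answer + 1)

def unSumB : Sum (Int × Int) Int → Int
  | .inl (_, a) => a
  | .inr a => a

theorem foldl_stepB_inr (k : Int) (l : List Int) (a : Int) :
    l.foldl (stepB k) (.inr a) = .inr a := by
  induction l with
  | nil => rfl
  | cons v vs ih => simpa [stepB] using ih

theorem loopA_eq_foldl (k : Int) (l : List Int) (cnt answer : Int) :
    loopA k cnt answer l = unSumB (l.foldl (stepB k) (.inl (cnt, answer))) := by
  induction l generalizing cnt answer with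
  | nil => rfl
  | cons v vs ih =>
      simp only [loopA, stepB, List.foldl]
      split_ifs with h
      · simp [foldl_stepB_inr, unSumB]
      · exact ih _ _

theorem innerB_eq_foldl (k c : Int) (m : Nat) (st : Int × Int) :
    innerB k c m st = (List.replicate m c).foldl (stepB k) (.inl st) := by
  induction m generalizing st with
  | zero => rfl
  | succ m ih =>
      obtain ⟨cnt, answer⟩ := st
      simp only [innerB, List.replicate, List.foldl, stepB]
      split_ifs with h
      · simp [foldl_stepB_inr]
      · exact ih _

theorem foldl_flatMap' {α β γ : Type} (g : α → List β) (f : γ → β → γ) (l : List α) (init : γ) :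
    (l.flatMap g).foldl f init = l.foldl (fun acc x => (g x).foldl f acc) init := by
  induction l generalizing init with
  | nil => rfl
  | cons x xs ih => simp [List.flatMap_cons, List.foldl_append, ih]

theorem count_flatMap_replicate (cs : List Int) (hnd : cs.Nodup) (m : Int → Nat) (x : Int) :
    (cs.flatMap (fun c => List.replicate (m c) c)).count x = if x ∈ cs then m x else 0 := by
  induction cs with
  | nil => simp
  | cons c cs ih =>
      simp only [List.flatMap_cons, List.count_append, List.count_replicate,
        ih (List.nodup_cons.mp hnd).2, List.mem_cons]
      rcases List.nodup_cons.mp hnd with ⟨hc, _⟩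
      by_cases hx : x = c
      · subst hx; simp [hc]
      · simp [hx, Ne.symm hx, beq_iff_eq]

theorem pairwise_flatMap_replicate (cs : List Int) (h : cs.Pairwise (· > ·)) (m : Int → Nat) :
    (cs.flatMap (fun c => List.replicate (m c) c)).Pairwise (· ≥ ·) := by
  induction cs with
  | nil => simp
  | cons c cs ih =>
      rcases List.pairwise_cons.mp h with ⟨hc, hcs⟩
      simp only [List.flatMap_cons]
      rw [List.pairwise_append]
      refine ⟨?_, ih hcs, ?_⟩
      · exact List.pairwise_replicate.mpr (Or.inr le_rfl)
      · intro a ha b hb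
        rcases List.mem_flatMap.mp hb with ⟨c2, hc2, hb2⟩
        rw [List.eq_of_mem_replicate ha, List.eq_of_mem_replicate hb2]
        exact le_of_lt (hc c2 hc2)

theorem solution_eq_alt (k : Int) (t : List Int) : solution k t = solution_alt k t := by
  -- the two counting loops build the same dict (Counter t)
  have hfun : (fun (d : PySem.Dict Int Int) size =>
      if d.getD size 0 ≠ 0 then d.insert size (d.getD size 0 + 1) else d.insert size 1)
      = (fun (d : PySem.Dict Int Int) size => d.insert size (d.getD size 0 + 1)) := by
    funext d size
    by_cases h : d.getD size 0 = 0 <;> simp [h]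
  set V : List Int := (PySem.Dict.counter t).values with hVdef
  set n : Int := (t.length : Int) with hndef
  set R : List Int := PySem.List.pyRange n 0 (-1) with hRdef
  set E : List Int := R.flatMap (fun c => List.replicate (V.count c) c) with hEdef
  have hRnd : R.Nodup := by
    rw [hRdef, PySem.List.pyRange_neg_one_eq_reverse]
    exact List.nodup_reverse.mpr (PySem.List.nodup_pyRange_one _ _)
  have hRpw : R.Pairwise (· > ·) := by
    rw [hRdef, PySem.List.pyRange_neg_one_eq_reverse]
    exact List.pairwise_reverse.mpr (PySem.List.pairwise_lt_pyRange_one _ _)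
  have hVmap : V = (PySem.Set.ofList t).map (fun s => ((t.count s : Nat) : Int)) := by
    rw [hVdef]
    simp [PySem.Dict.values, PySem.Dict.items_counter, List.map_map, Function.comp]
  have hmem : ∀ v ∈ V, 1 ≤ v ∧ v ≤ n := by
    rw [hVmap]
    intro v hv
    rcases List.mem_map.mp hv with ⟨s, hs, rfl⟩
    have hs' : s ∈ t := (PySem.Set.mem_ofList t s).mp hs
    constructor
    · exact_mod_cast List.count_pos_iff.mpr hs'
    · have h2 := List.count_le_length (a := s) (l := t)
      rw [hndef]
      exact_mod_cast h2
  have hpermEV : E.Perm V := by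
    refine List.perm_iff_count.mpr (fun x => ?_)
    rw [hEdef, count_flatMap_replicate R hRnd]
    by_cases hx : x ∈ R
    · simp [hx]
    · simp only [hx, if_false]
      symm
      refine List.count_eq_zero.mpr (fun hxV => ?_)
      rcases hmem x hxV with ⟨h1, h2⟩
      exact hx (by rw [hRdef]; exact (PySem.List.mem_pyRange_neg_one).mpr ⟨by omega, h2⟩)
  have hEpw : E.Pairwise (· ≥ ·) := pairwise_flatMap_replicate R hRpw _
  have hsorted : PySem.List.sorted V (fun x => x) true = E := by
    refine ((PySem.List.sorted_perm V (fun x => x) true).trans hpermEV.symm).eq_of_pairwise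
      (fun a b _ _ h1 h2 => le_antisymm h2 h1) ?_ hEpw
    exact (PySem.List.sorted_pairwise_rev V (fun x => x)).imp (fun h => h)
  have houter : (fun (s : Sum (Int × Int) Int) c =>
        match s with
        | .inr a => .inr a
        | .inl st => innerB k c ((PySem.Dict.counter V).getD c 0).toNat st)
      = (fun (acc : Sum (Int × Int) Int) c => (List.replicate (V.count c) c).foldl (stepB k) acc) := by
    funext s c
    have hm : ((PySem.Dict.counter V).getD c 0).toNat = V.count c := by
      rw [PySem.Dict.getD_counter]; exact Int.toNat_natCast _
    cases s with
    | inr a => exact (foldl_stepB_inr k _ a).symm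
    | inl st =>
        show innerB k c ((PySem.Dict.counter V).getD c 0).toNat st = _
        rw [hm, innerB_eq_foldl]
  calc solution k t
      = loopA k 0 0 (PySem.List.sorted V (fun x => x) true) := by
        simp only [solution, hfun, PySem.Dict.foldl_insert_getD_add_one_eq_counter, hVdef]
    _ = unSumB (E.foldl (stepB k) (Sum.inl (0, 0))) := by rw [hsorted, loopA_eq_foldl]
    _ = unSumB (R.foldl (fun acc c => (List.replicate (V.count c) c).foldl (stepB k) acc) (Sum.inl (0, 0))) := by
        rw [hEdef, foldl_flatMap']
    _ = solution_alt k t := by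
        simp only [solution_alt, PySem.Dict.foldl_insert_getD_add_one_eq_counter,
          ← hVdef, ← hndef, ← hRdef, houter, unSumB]

-- ===== VERDICT (by name: the statement is the Claim_ definition above) =====
theorem solution_spec : Claim_equal_solution := by
  intro k t _
  unfold Spec_solution
  exact solution_eq_alt k t
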